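-- pv_equiv track=rewrite | github.com/KMORaza/leetcode-solutions | LeetCode Solutions/1954.py | minimumPerimeter
-- ===== SOURCE A (Python) =====
-- def minimumPerimeter(targetFruits: int) -> int:
--     start, end = 1, 100000
--     while start < end:
--         midPoint = (start + end) // 2
--         if 2 * midPoint * (midPoint + 1) * (2 * midPoint + 1) >= targetFruits:
--             end = midPoint
--         else:
--             start = midPoint + 1
--     return start * 8
-- ===== SOURCE B (Python) =====
-- def minimumPerimeter(targetFruits: int) -> int:
--     # fruits within taxicab distance n grow by 12*n*n per ring,
--     # so accumulate ring sizes and return at the first sufficient n.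
--     fruits = 0
--     for n in range(1, 100001):
--         fruits += 12 * n * n
--         if fruits >= targetFruits:
--             return n * 8
--     return 100000 * 8
-- ===== Notes on version B (the rewrite author's own statement) =====
-- stated objective: simpler
-- what changed: Replaces the binary search over [1,100000] with a single forward pass that accumulates the per-ring fruit count 12*n*n (no cubic formula) and returns at the first n whose running total reaches the target, saturating at n = 100000.
import Mathlib
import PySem

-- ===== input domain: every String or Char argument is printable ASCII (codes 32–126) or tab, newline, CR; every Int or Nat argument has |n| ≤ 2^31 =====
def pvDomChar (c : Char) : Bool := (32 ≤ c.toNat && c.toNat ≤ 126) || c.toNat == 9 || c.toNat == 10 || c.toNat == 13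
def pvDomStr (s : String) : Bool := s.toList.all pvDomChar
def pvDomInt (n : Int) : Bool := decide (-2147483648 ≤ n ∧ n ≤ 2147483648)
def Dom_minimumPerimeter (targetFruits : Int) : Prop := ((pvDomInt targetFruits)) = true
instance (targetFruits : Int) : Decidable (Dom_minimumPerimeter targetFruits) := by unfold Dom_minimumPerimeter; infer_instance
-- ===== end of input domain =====

-- B replaces A's binary search with one forward pass accumulating the per-ring
-- fruit count 12*n*n until the running total reaches the target; objective: simpler.

-- ===== PORT A =====
-- A's while loop: state (start, end_); fuel is only a totality guard (the gap end_-start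
-- shrinks every iteration, and the initial fuel 100000 bounds it)
def mpLoop (targetFruits : Int) : Nat → Int → Int → Int
  | 0, start, _ => start * 8
  | fuel + 1, start, end_ =>
    if start < end_ then
      let midPoint := PySem.Int.floordiv (start + end_) 2
      if 2 * midPoint * (midPoint + 1) * (2 * midPoint + 1) ≥ targetFruits then
        mpLoop targetFruits fuel start midPoint
      else
        mpLoop targetFruits fuel (midPoint + 1) end_
    else
      start * 8

def minimumPerimeter (targetFruits : Int) : Int :=
  mpLoop targetFruits 100000 1 100000

-- ===== PORT B =====
-- B's for loop over range(1, 100001): structural recursion on the remaining range,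
-- carrying the running total `fruits`; the empty-list case is the loop's fallthrough
def mpFor (targetFruits : Int) : List Int → Int → Int
  | [], _ => 100000 * 8
  | n :: rest, fruits =>
    let fruits' := fruits + 12 * n * n
    if fruits' ≥ targetFruits then n * 8
    else mpFor targetFruits rest fruits'

def minimumPerimeter_alt (targetFruits : Int) : Int :=
  mpFor targetFruits (PySem.List.pyRange 1 100001 1) 0

-- ===== PRECONDITION & SPEC =====
def Spec_minimumPerimeter (targetFruits : Int) (out : Int) : Prop := out = minimumPerimeter_alt targetFruits
instance (targetFruits : Int) (out : Int) : Decidable (Spec_minimumPerimeter targetFruits out) := by unfold Spec_minimumPerimeter; infer_instance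

-- ===== CLAIM (what is proved, stated in full; the proofs are below) =====
def Claim_equal_minimumPerimeter : Prop := ∀ (targetFruits : Int), Dom_minimumPerimeter targetFruits → Spec_minimumPerimeter targetFruits (minimumPerimeter targetFruits)

-- ===== LEMMAS AND PROOFS =====

-- proof-side intermediate: a threshold scan, used to bridge the two ports
def mpScan (targetFruits : Int) : Nat → Int → Int
  | 0, n => n * 8
  | fuel + 1, n =>
    if n < 100000 ∧ 2 * n * (n + 1) * (2 * n + 1) < targetFruits then
      mpScan targetFruits fuel (n + 1)
    else
      n * 8

-- fruit count is monotone in n on n ≥ 1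
theorem mpMono (t a b : Int) (h1 : 1 ≤ a) (hab : a ≤ b)
    (hP : 2 * a * (a + 1) * (2 * a + 1) ≥ t) : 2 * b * (b + 1) * (2 * b + 1) ≥ t := by
  nlinarith [sq_nonneg (b - a), sq_nonneg (a + b), sq_nonneg a, sq_nonneg b]

-- the scan's value does not depend on the fuel, as long as the fuel covers 100000 - n
theorem mpScan_fuel (t : Int) : ∀ (f1 f2 : Nat) (n : Int),
    (100000 - n).toNat ≤ f1 → (100000 - n).toNat ≤ f2 →
    mpScan t f1 n = mpScan t f2 n := by
  intro f1
  induction f1 with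
  | zero =>
    intro f2 n h1 h2
    cases f2 with
    | zero => rfl
    | succ g => rw [mpScan, mpScan, if_neg (by omega)]
  | succ g1 ih =>
    intro f2 n h1 h2
    cases f2 with
    | zero => rw [mpScan, mpScan, if_neg (by omega)]
    | succ g2 =>
      rw [mpScan, mpScan]
      by_cases hc : n < 100000 ∧ 2 * n * (n + 1) * (2 * n + 1) < t
      · rw [if_pos hc, if_pos hc]
        exact ih g2 (n + 1) (by omega) (by omega)
      · rw [if_neg hc, if_neg hc]

-- the scan skips over any prefix of below-threshold values
theorem mpScan_skip (t m : Int) : ∀ (d : Nat) (s : Int), (m - s).toNat ≤ d → s ≤ m →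
    (∀ k, s ≤ k → k < m → k < 100000 ∧ 2 * k * (k + 1) * (2 * k + 1) < t) →
    ∀ (f1 f2 : Nat), (100000 - s).toNat ≤ f1 → (100000 - m).toNat ≤ f2 →
    mpScan t f1 s = mpScan t f2 m := by
  intro d
  induction d with
  | zero =>
    intro s hd hs _ f1 f2 h1 h2
    have hsm : s = m := by omega
    subst hsm
    exact mpScan_fuel t f1 f2 s h1 h2
  | succ d ih =>
    intro s hd hs hall f1 f2 h1 h2
    by_cases hsm : s < m
    · have hk := hall s le_rfl hsm
      cases f1 with
      | zero => omega
      | succ g1 =>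
        rw [mpScan, if_pos hk]
        exact ih (s + 1) (by omega) (by omega) (fun k hk1 hk2 => hall k (by omega) hk2)
          g1 f2 (by omega) h2
    · have hseq : s = m := by omega
      subst hseq
      exact mpScan_fuel t f1 f2 s h1 h2

-- when the loop test is false, the scan returns n * 8 whatever the fuel
theorem mpScan_stop (t : Int) (f : Nat) (n : Int)
    (h : ¬ (n < 100000 ∧ 2 * n * (n + 1) * (2 * n + 1) < t)) :
    mpScan t f n = n * 8 := by
  cases f with
  | zero => rfl
  | succ g => rw [mpScan, if_neg h]

-- binary search equals the threshold scan, under the loop invariant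
theorem mpLoop_eq_scan (t : Int) : ∀ (fuel : Nat) (s e : Int) (sf : Nat),
    (e - s).toNat ≤ fuel → (100000 - s).toNat ≤ sf →
    1 ≤ s → s ≤ e → e ≤ 100000 →
    (2 * e * (e + 1) * (2 * e + 1) ≥ t ∨ e = 100000) →
    mpLoop t fuel s e = mpScan t sf s := by
  intro fuel
  induction fuel with
  | zero =>
    intro s e sf hd hsf h1 hse he hend
    have hseq : s = e := by omega
    subst hseq
    rw [mpLoop]
    refine (mpScan_stop t sf s ?_).symm
    rcases hend with hP | h100
    · omega
    · omega
  | succ fuel ih =>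
    intro s e sf hd hsf h1 hse he hend
    by_cases h : s < e
    · rw [mpLoop, if_pos h]
      have hb := PySem.Int.floordiv_two_mid_bounds (le_of_lt h)
      have hlt : PySem.Int.floordiv (s + e) 2 < e :=
        (PySem.Int.floordiv_lt_iff_lt_mul (by norm_num)).mpr (by omega)
      set m := PySem.Int.floordiv (s + e) 2 with hm
      by_cases hP : 2 * m * (m + 1) * (2 * m + 1) ≥ t
      · rw [if_pos hP]
        exact ih s m sf (by omega) hsf h1 (by omega) (by omega) (Or.inl hP)
      · rw [if_neg hP]
        have step : mpLoop t fuel (m + 1) e = mpScan t sf (m + 1) :=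
          ih (m + 1) e sf (by omega) (by omega) (by omega) (by omega) he hend
        rw [step]
        refine (mpScan_skip t (m + 1) (m + 1 - s).toNat s le_rfl (by omega) ?_ sf sf hsf (by omega)).symm
        intro k hk1 hk2
        refine ⟨by omega, ?_⟩
        by_contra hge
        exact hP (mpMono t k m (by omega) (by omega) (by omega))
    · have hseq : s = e := by omega
      subst hseq
      rw [mpLoop, if_neg h]
      refine (mpScan_stop t sf s ?_).symm
      rcases hend with hP | h100
      · omega
      · omega

-- B's accumulating pass equals the threshold scan: the running total entering
-- iteration n is 2*(n-1)*n*(2*n-1), so fruits + 12*n*n is the cubic count at n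
theorem mpFor_eq_scan (t : Int) : ∀ (k : Nat) (sf : Nat) (n fruits : Int),
    1 ≤ n → n ≤ 100000 → (100001 - n).toNat ≤ k → (100000 - n).toNat ≤ sf →
    fruits = 2 * (n - 1) * n * (2 * n - 1) →
    mpFor t (PySem.List.pyRange n 100001 1) fruits = mpScan t sf n := by
  intro k
  induction k with
  | zero => intro sf n fruits h1 h2 hk; omega
  | succ k ih =>
    intro sf n fruits h1 h2 hk hsf hf
    rw [PySem.List.pyRange_one_cons (by omega : n < 100001), mpFor]
    have hcube : fruits + 12 * n * n = 2 * n * (n + 1) * (2 * n + 1) := by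
      rw [hf]; ring
    by_cases hP : fruits + 12 * n * n ≥ t
    · rw [if_pos hP]
      refine (mpScan_stop t sf n ?_).symm
      omega
    · rw [if_neg hP]
      by_cases hn : n < 100000
      · cases sf with
        | zero => omega
        | succ g =>
          rw [mpScan, if_pos ⟨hn, by omega⟩]
          exact ih g (n + 1) (fruits + 12 * n * n) (by omega) (by omega) (by omega)
            (by omega) (by rw [hf]; ring)
      · have hn100 : n = 100000 := by omega
        rw [PySem.List.pyRange_one_eq_nil (by omega), mpFor, mpScan_stop t sf n (by omega), hn100]

-- ===== VERDICT (by name: the statement is the Claim_ definition above) =====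
theorem minimumPerimeter_spec : Claim_equal_minimumPerimeter := by
  intro t _
  show minimumPerimeter t = minimumPerimeter_alt t
  have hB : minimumPerimeter_alt t = mpScan t 100000 1 :=
    mpFor_eq_scan t 100001 100000 1 0 (by omega) (by omega) (by norm_num) (by norm_num) (by ring)
  rw [hB]
  exact mpLoop_eq_scan t 100000 1 100000 100000 (by norm_num) (by norm_num) (by omega) (by omega) (by omega) (Or.inr rfl)
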